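-- pv_equiv track=rewrite | github.com/jasonleinart/nexus-letter-analyzer | src/models/scoring_engine.py | _has_proper_medical_terminology
-- ===== SOURCE A (Python) =====
-- from typing import Dict, List, Tuple, Optional
--
-- def _has_proper_medical_terminology(findings: List[str]) -> bool:
--     """Check for proper medical terminology usage."""
--     medical_terms = [
--         "diagnosis",
--         "condition",
--         "symptom",
--         "treatment",
--         "prognosis",
--         "etiology",
--     ]
--     findings_text = " ".join(findings).lower()
--     return sum(1 for term in medical_terms if term in findings_text) >= 2
-- ===== SOURCE B (Python) =====
-- from typing import List
--
-- _MEDICAL_TERMS = (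
--     "diagnosis",
--     "condition",
--     "symptom",
--     "treatment",
--     "prognosis",
--     "etiology",
-- )
--
-- def _has_proper_medical_terminology(findings: List[str]) -> bool:
--     """Check for proper medical terminology usage."""
--     # No term contains a space, so a term occurs in " ".join(findings) iff it
--     # occurs inside a single finding; collect distinct found terms per finding
--     # and stop as soon as two distinct terms have been seen.
--     found = set()
--     for finding in findings:
--         text = finding.lower()
--         for term in _MEDICAL_TERMS:
--             if term in text:
--                 found.add(term)
--         if len(found) >= 2:
--             return True
--     return False
-- ===== Notes on version B (the rewrite author's own statement) =====
-- stated objective: alternative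
-- what changed: Instead of joining all findings into one string and running six substring searches over it, B scans the findings one by one, collecting the distinct terms found per lowercased finding in a set and returning True as soon as two distinct terms have been seen (sound because join's space separator occurs in no term).
import Mathlib
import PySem

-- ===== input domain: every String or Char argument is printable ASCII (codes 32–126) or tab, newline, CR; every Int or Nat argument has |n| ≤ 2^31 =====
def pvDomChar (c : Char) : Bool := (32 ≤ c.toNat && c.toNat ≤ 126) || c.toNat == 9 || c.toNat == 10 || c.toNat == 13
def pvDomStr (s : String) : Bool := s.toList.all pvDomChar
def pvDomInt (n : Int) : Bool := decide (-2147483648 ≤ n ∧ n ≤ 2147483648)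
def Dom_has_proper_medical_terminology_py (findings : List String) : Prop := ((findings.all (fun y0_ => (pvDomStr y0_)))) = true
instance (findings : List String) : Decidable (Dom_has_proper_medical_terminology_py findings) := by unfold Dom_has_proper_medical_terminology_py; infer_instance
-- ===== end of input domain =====

-- B scans the findings one by one, collecting the distinct terms found per lowercased finding
-- in a set with an early exit at two, instead of A's six substring searches over the joined
-- text (alternative decomposition; sound because join's space separator occurs in no term).

-- ===== PORT A =====
def pvMedicalTermsA : List String :=
  ["diagnosis", "condition", "symptom", "treatment", "prognosis", "etiology"]

def has_proper_medical_terminology_py (findings : List String) : Bool :=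
  let findings_text := PySem.Str.lower (PySem.Str.join " " findings)
  decide (2 ≤ pvMedicalTermsA.foldl
    (fun acc term => if PySem.Str.isIn term findings_text then acc + 1 else acc) (0 : Int))

-- ===== PORT B =====
def pvMedicalTermsB : List String :=
  ["diagnosis", "condition", "symptom", "treatment", "prognosis", "etiology"]

def pvScanFinding (found : PySem.Set String) (text : String) : PySem.Set String :=
  pvMedicalTermsB.foldl
    (fun s term => if PySem.Str.isIn term text then PySem.Set.add s term else s) found

def pvLoopB (found : PySem.Set String) : List String → Bool
  | [] => false
  | finding :: rest =>
      let found' := pvScanFinding found (PySem.Str.lower finding)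
      if 2 ≤ PySem.Set.len found' then true else pvLoopB found' rest

def has_proper_medical_terminology_py_alt (findings : List String) : Bool :=
  pvLoopB PySem.Set.empty findings

-- ===== PRECONDITION & SPEC =====
def Spec_has_proper_medical_terminology_py (findings : List String) (out : Bool) : Prop := out = has_proper_medical_terminology_py_alt findings
instance (findings : List String) (out : Bool) : Decidable (Spec_has_proper_medical_terminology_py findings out) := by unfold Spec_has_proper_medical_terminology_py; infer_instance

-- ===== CLAIM (what is proved, stated in full; the proofs are below) =====
def Claim_equal_has_proper_medical_terminology_py : Prop := ∀ (findings : List String), Dom_has_proper_medical_terminology_py findings → Spec_has_proper_medical_terminology_py findings (has_proper_medical_terminology_py findings)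

-- ===== LEMMAS AND PROOFS =====

-- an infix that contains no copy of the separator c lies entirely inside one side of the split
theorem pv_infix_sep {t a b : List Char} {c : Char} (hc : c ∉ t) :
    t <:+: a ++ c :: b ↔ t <:+: a ∨ t <:+: b := by
  constructor
  · rintro ⟨s, u, h⟩
    rw [List.append_assoc] at h
    rcases List.append_eq_append_iff.mp h with ⟨a', ha, h2⟩ | ⟨c', hs, h2⟩
    · rcases List.append_eq_append_iff.mp h2 with ⟨w, hw, hu⟩ | ⟨v, ht, hv⟩
      · left; exact ⟨s, w, by rw [ha, hw]; simp⟩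
      · cases v with
        | nil => left; exact ⟨s, [], by simp at ht ⊢; rw [ha, ht]⟩
        | cons x v' =>
          exfalso
          have hx : x = c := (List.cons.injEq _ _ _ _ ▸ hv.symm).1
          exact hc (by rw [ht, hx]; simp)
    · cases c' with
      | nil =>
        simp at h2
        cases t with
        | nil => right; exact ⟨[], b, by simp⟩
        | cons y t' =>
          exfalso
          have hy : y = c := (List.cons.injEq _ _ _ _ ▸ h2).1.symm
          exact hc (by rw [hy]; simp)
      | cons x c'' =>
        right
        have hb : b = c'' ++ (t ++ u) := (List.cons.injEq _ _ _ _ ▸ h2).2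
        exact ⟨c'', u, by rw [hb]; simp⟩
  · rintro (⟨s, u, h⟩ | ⟨s, u, h⟩)
    · exact ⟨s, u ++ c :: b, by rw [← h]; simp⟩
    · exact ⟨a ++ c :: s, u, by rw [← h]; simp⟩

-- a nonempty word avoiding the one-character separator is an infix of the join iff of some part
theorem pv_infix_join {t : List Char} {c : Char} (hc : c ∉ t) (hne : t ≠ [])
    (l : List (List Char)) :
    t <:+: PySem.Chars.join [c] l ↔ ∃ x ∈ l, t <:+: x := by
  induction l with
  | nil =>
    simp [PySem.Chars.join_nil, List.infix_nil, hne]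
  | cons x l ih =>
    cases l with
    | nil => simp [PySem.Chars.join_singleton]
    | cons y r =>
      rw [PySem.Chars.join_cons_cons]
      rw [List.append_assoc, List.singleton_append, pv_infix_sep hc]
      simp [ih]

-- lowercasing commutes with joining by a space (space lowercases to itself)
theorem pv_lower_join (l : List (List Char)) :
    PySem.Chars.lower (PySem.Chars.join [' '] l) =
      PySem.Chars.join [' '] (l.map PySem.Chars.lower) := by
  induction l with
  | nil => simp [PySem.Chars.join_nil, PySem.Chars.lower]
  | cons x l ih =>
    cases l with
    | nil => simp [PySem.Chars.join_singleton]
    | cons y r =>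
      rw [PySem.Chars.join_cons_cons, List.map_cons, List.map_cons,
        PySem.Chars.join_cons_cons, ← List.map_cons]
      simp only [PySem.Chars.lower, List.map_append] at ih ⊢
      rw [ih]
      rfl

theorem pv_foldl_add_prefix (l : List String) (p : String → Bool) (s : PySem.Set String) :
    s <+: l.foldl (fun s term => if p term then PySem.Set.add s term else s) s := by
  induction l generalizing s with
  | nil => exact List.prefix_refl s
  | cons x l ih =>
    simp only [List.foldl_cons]
    refine List.IsPrefix.trans ?_ (ih _)
    by_cases h : p x
    · simp only [h, if_true, PySem.Set.add]
      split
      · exact List.prefix_refl s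
      · exact ⟨[x], rfl⟩
    · simp [h]

theorem pv_foldl_add_mem (l : List String) (p : String → Bool) (s : PySem.Set String) (x : String) :
    x ∈ l.foldl (fun s term => if p term then PySem.Set.add s term else s) s ↔
      x ∈ s ∨ (x ∈ l ∧ p x = true) := by
  induction l generalizing s with
  | nil => simp
  | cons y l ih =>
    simp only [List.foldl_cons, ih]
    by_cases h : p y
    · simp only [h, if_true, PySem.Set.mem_add]
      constructor
      · rintro ((hs | rfl) | hl)
        · exact Or.inl hs
        · exact Or.inr ⟨List.mem_cons_self .., h⟩
        · exact Or.inr ⟨List.mem_cons_of_mem _ hl.1, hl.2⟩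
      · rintro (hs | ⟨hm, hp⟩)
        · exact Or.inl (Or.inl hs)
        · rcases List.mem_cons.mp hm with rfl | hm
          · exact Or.inl (Or.inr rfl)
          · exact Or.inr ⟨hm, hp⟩
    · simp only [h]
      constructor
      · rintro (hs | hl)
        · exact Or.inl hs
        · exact Or.inr ⟨List.mem_cons_of_mem _ hl.1, hl.2⟩
      · rintro (hs | ⟨hm, hp⟩)
        · exact Or.inl hs
        · rcases List.mem_cons.mp hm with rfl | hm
          · exact absurd hp (by simp [h])
          · exact Or.inr ⟨hm, hp⟩

theorem pv_foldl_add_nodup (l : List String) (p : String → Bool) (s : PySem.Set String)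
    (hs : s.Nodup) :
    (l.foldl (fun s term => if p term then PySem.Set.add s term else s) s).Nodup := by
  induction l generalizing s with
  | nil => exact hs
  | cons y l ih =>
    simp only [List.foldl_cons]
    apply ih
    by_cases h : p y
    · simpa [h] using PySem.Set.nodup_add s y hs
    · simpa [h] using hs

theorem pv_scan_prefix (s : PySem.Set String) (text : String) : s <+: pvScanFinding s text :=
  pv_foldl_add_prefix _ _ _

theorem pv_F_prefix (findings : List String) (s : PySem.Set String) :
    s <+: findings.foldl (fun s f => pvScanFinding s (PySem.Str.lower f)) s := by
  induction findings generalizing s with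
  | nil => exact List.prefix_refl s
  | cons f rest ih =>
    simp only [List.foldl_cons]
    exact List.IsPrefix.trans (pv_scan_prefix s _) (ih _)

-- the early-exit loop returns true iff the fully accumulated set reaches two elements
theorem pv_loop_iff (rest : List String) (s : PySem.Set String) (hs : s.length < 2) :
    pvLoopB s rest = true ↔
      2 ≤ (rest.foldl (fun s f => pvScanFinding s (PySem.Str.lower f)) s).length := by
  induction rest generalizing s with
  | nil => simp [pvLoopB]; omega
  | cons f rest ih =>
    simp only [pvLoopB, List.foldl_cons]
    by_cases h2 : 2 ≤ (pvScanFinding s (PySem.Str.lower f)).length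
    · have hlen : (2:Int) ≤ PySem.Set.len (pvScanFinding s (PySem.Str.lower f)) := by
        simp [PySem.Set.len]; exact_mod_cast h2
      simp only [hlen, if_true, true_iff]
      exact le_trans h2 ((pv_F_prefix rest _).length_le)
    · have hlen : ¬ (2:Int) ≤ PySem.Set.len (pvScanFinding s (PySem.Str.lower f)) := by
        simp [PySem.Set.len]; omega
      simp only [hlen, if_false]
      exact ih _ (by omega)

theorem pv_F_mem (findings : List String) (s : PySem.Set String) (x : String) :
    x ∈ findings.foldl (fun s f => pvScanFinding s (PySem.Str.lower f)) s ↔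
      x ∈ s ∨ (x ∈ pvMedicalTermsB ∧
        ∃ f ∈ findings, PySem.Str.isIn x (PySem.Str.lower f) = true) := by
  induction findings generalizing s with
  | nil => simp
  | cons f rest ih =>
    rw [List.foldl_cons, ih]
    have hmem : x ∈ pvScanFinding s (PySem.Str.lower f) ↔
        x ∈ s ∨ (x ∈ pvMedicalTermsB ∧ PySem.Str.isIn x (PySem.Str.lower f) = true) := by
      exact pv_foldl_add_mem _ _ _ _
    rw [hmem]
    constructor
    · rintro ((hs | ⟨hT, hin⟩) | ⟨hT, g, hg, hin⟩)
      · exact Or.inl hs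
      · exact Or.inr ⟨hT, f, List.mem_cons_self .., hin⟩
      · exact Or.inr ⟨hT, g, List.mem_cons_of_mem _ hg, hin⟩
    · rintro (hs | ⟨hT, g, hg, hin⟩)
      · exact Or.inl (Or.inl hs)
      · rcases List.mem_cons.mp hg with rfl | hg
        · exact Or.inl (Or.inr ⟨hT, hin⟩)
        · exact Or.inr ⟨hT, g, hg, hin⟩

theorem pv_F_nodup (findings : List String) (s : PySem.Set String) (hs : s.Nodup) :
    (findings.foldl (fun s f => pvScanFinding s (PySem.Str.lower f)) s).Nodup := by
  induction findings generalizing s with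
  | nil => exact hs
  | cons f rest ih => exact ih _ (pv_foldl_add_nodup _ _ _ hs)

-- a term without a space occurs in the lowered join iff it occurs in some lowered finding
theorem pv_term_in_join (findings : List String) (t : String)
    (hc : ' ' ∉ t.toList) (hne : t.toList ≠ []) :
    PySem.Str.isIn t (PySem.Str.lower (PySem.Str.join " " findings)) = true ↔
      ∃ f ∈ findings, PySem.Str.isIn t (PySem.Str.lower f) = true := by
  rw [PySem.Str.isIn_iff_infix, PySem.Str.toList_lower, PySem.Str.toList_join,
    show (" ":String).toList = [' '] from rfl, pv_lower_join, pv_infix_join hc hne]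
  simp [PySem.Chars.isIn_iff_infix]

theorem pv_main (findings : List String) :
    has_proper_medical_terminology_py findings =
      has_proper_medical_terminology_py_alt findings := by
  apply Bool.coe_iff_coe.mp
  have hterms : ∀ t ∈ pvMedicalTermsA, ' ' ∉ t.toList ∧ t.toList ≠ [] := by decide
  have hcong : List.countP
      (fun term => PySem.Str.isIn term (PySem.Str.lower (PySem.Str.join " " findings)))
      pvMedicalTermsA =
      List.countP (fun term => findings.any fun f => PySem.Str.isIn term (PySem.Str.lower f))
      pvMedicalTermsA := by
    refine List.countP_congr fun t ht => ?_
    rw [pv_term_in_join findings t (hterms t ht).1 (hterms t ht).2, List.any_eq_true]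
  have hperm : (pvMedicalTermsA.filter
      (fun term => findings.any fun f => PySem.Str.isIn term (PySem.Str.lower f))).Perm
      (findings.foldl (fun s f => pvScanFinding s (PySem.Str.lower f)) PySem.Set.empty) := by
    refine (List.perm_ext_iff_of_nodup
      (List.Nodup.filter _ (by decide)) (pv_F_nodup _ _ List.nodup_nil)).mpr fun x => ?_
    rw [List.mem_filter, pv_F_mem, List.any_eq_true]
    simp [pvMedicalTermsB, pvMedicalTermsA]
  have hB := pv_loop_iff findings PySem.Set.empty (by simp [PySem.Set.empty])
  simp only [has_proper_medical_terminology_py, has_proper_medical_terminology_py_alt]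
  rw [PySem.List.foldl_count_if, hB, ← hperm.length_eq, ← List.countP_eq_length_filter,
    ← hcong, decide_eq_true_iff]
  omega

-- ===== VERDICT (by name: the statement is the Claim_ definition above) =====
theorem has_proper_medical_terminology_py_spec : Claim_equal_has_proper_medical_terminology_py := by
  intro findings _
  exact pv_main findings
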